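-- pv_equiv track=rewrite | github.com/yizhoucc/med_dict | ult.py | find_relevant_definitions
-- ===== SOURCE A (Python) =====
-- INJECT_PRIORITY_TERMS = {
--     # Abbreviations - highest priority (model may not know what these stand for)
--     "dcis", "idc", "ilc", "fish", "ihc", "suv",
--     "brca1", "brca2", "tnbc",
--     # Biomarkers with numeric values - model confuses units/meaning
--     "ki-67 proliferation index", "ki-67 score", "ki-67",
--     "her2", "her2 positive", "her2 negative", "her2/neu",
--     "er positive", "er negative",
--     "pr positive", "pr negative",
--     # Response classification terms - model confuses with common English
--     "stable disease", "progressive disease", "partial response", "complete response",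
--     # Treatment intent terms - model confuses with visit purpose
--     "neoadjuvant therapy", "adjuvant therapy", "adjuvant chemotherapy",
--     "palliative therapy", "palliative care",
--     # Staging/grading - model confuses grade vs stage vs size
--     "sentinel lymph node", "sentinel node biopsy",
--     "lymphovascular invasion",
--     # Procedures model may confuse
--     "lumpectomy", "mastectomy",
--     "aromatase inhibitor",
--     # Receptor/molecular testing
--     "estrogen receptor", "progesterone receptor",
--     "triple-negative breast cancer", "triple negative breast cancer",
-- }
--
-- def find_relevant_definitions(note_text, dictionary, max_terms=15):
--     """Scan note for medical terms and return definitions for terms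
--     the model is most likely to misunderstand.
--
--     Strategy:
--     1. Only match terms in INJECT_PRIORITY_TERMS (curated high-confusion list)
--     2. Prefer longer/more specific term matches over short ones
--     3. Cap at max_terms to control context size (~50 tokens per definition)
--
--     Returns list of (term, definition) tuples.
--     """
--     if not dictionary:
--         return []
--
--     note_lower = note_text.lower()
--     matched = []
--
--     for priority_term in INJECT_PRIORITY_TERMS:
--         if priority_term in note_lower and priority_term in dictionary:
--             term_orig, definition = dictionary[priority_term]
--             matched.append((term_orig, definition))
--
--     # Deduplicate: if both "ki-67" and "ki-67 score" matched, keep only the longer one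
--     matched.sort(key=lambda x: -len(x[0]))
--     seen_short = set()
--     deduped = []
--     for term, defn in matched:
--         short = term.lower().split()[0]  # first word
--         if short not in seen_short:
--             deduped.append((term, defn))
--             seen_short.add(short)
--
--     return deduped[:max_terms]
-- ===== SOURCE B (Python) =====
-- INJECT_PRIORITY_TERMS = [
--     "dcis", "idc", "ilc", "fish", "ihc", "suv",
--     "brca1", "brca2", "tnbc",
--     "ki-67 proliferation index", "ki-67 score", "ki-67",
--     "her2", "her2 positive", "her2 negative", "her2/neu",
--     "er positive", "er negative",
--     "pr positive", "pr negative",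
--     "stable disease", "progressive disease", "partial response", "complete response",
--     "neoadjuvant therapy", "adjuvant therapy", "adjuvant chemotherapy",
--     "palliative therapy", "palliative care",
--     "sentinel lymph node", "sentinel node biopsy",
--     "lymphovascular invasion",
--     "lumpectomy", "mastectomy",
--     "aromatase inhibitor",
--     "estrogen receptor", "progesterone receptor",
--     "triple-negative breast cancer", "triple negative breast cancer",
-- ]
--
--
-- def find_relevant_definitions(note_text, dictionary, max_terms=15):
--     """Scan the note for curated medical terms; keep, per first word, the
--     longest matching term, and return the winners longest-first."""
--     note_lower = note_text.lower()
--     best = {}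
--     for pt in INJECT_PRIORITY_TERMS:
--         if pt in note_lower and pt in dictionary:
--             term, definition = dictionary[pt]
--             first = term.lower().split()[0]
--             if first not in best or len(term) > len(best[first][0]):
--                 best[first] = (term, definition)
--     return sorted(best.values(), key=lambda td: -len(td[0]))[:max_terms]
-- ===== Notes on version B (the rewrite author's own statement) =====
-- stated objective: alternative
-- what changed: Replaces A's collect-all-matches + stable sort + seen-set dedup scan with a one-pass dict keyed by the term's first word that keeps only the longest match per first word, then one final sort of the dict values; Pre_ excludes inputs where two matched terms have equal length (there A's output order/choice follows Python's accidental set-iteration hash order) and inputs where a matched term has an empty first word (A raises IndexError).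
-- outside the precondition, e.g. on find_relevant_definitions('dcis', {'dcis': ('', 'd')}, 15): A raises IndexError, B raises IndexError
import Mathlib
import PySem

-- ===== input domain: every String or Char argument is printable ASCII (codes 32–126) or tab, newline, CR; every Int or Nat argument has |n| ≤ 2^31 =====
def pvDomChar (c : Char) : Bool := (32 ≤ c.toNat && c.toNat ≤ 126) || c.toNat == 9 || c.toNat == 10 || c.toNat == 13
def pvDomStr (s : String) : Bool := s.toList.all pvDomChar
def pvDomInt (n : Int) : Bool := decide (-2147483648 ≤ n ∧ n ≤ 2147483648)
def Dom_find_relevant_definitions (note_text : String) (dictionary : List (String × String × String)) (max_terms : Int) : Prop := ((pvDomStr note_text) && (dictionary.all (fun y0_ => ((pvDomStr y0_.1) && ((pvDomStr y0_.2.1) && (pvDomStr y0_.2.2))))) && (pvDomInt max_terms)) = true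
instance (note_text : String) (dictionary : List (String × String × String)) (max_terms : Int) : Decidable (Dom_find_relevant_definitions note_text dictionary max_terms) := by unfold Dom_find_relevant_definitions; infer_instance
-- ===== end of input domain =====

-- B replaces A's collect-all + stable sort + seen-set dedup scan with a one-pass dict keyed by the
-- term's first word (keeping the longest match per first word) followed by one sort of its values
-- (objective: alternative, same observable result inside Pre_).

-- ===== PORT A =====
-- INJECT_PRIORITY_TERMS in the source's written order; A iterates it as a Python set, whose
-- hash-dependent order affects the result only on length ties, which Pre_ excludes.
def pvPriorityTerms : List String :=
  ["dcis", "idc", "ilc", "fish", "ihc", "suv",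
   "brca1", "brca2", "tnbc",
   "ki-67 proliferation index", "ki-67 score", "ki-67",
   "her2", "her2 positive", "her2 negative", "her2/neu",
   "er positive", "er negative",
   "pr positive", "pr negative",
   "stable disease", "progressive disease", "partial response", "complete response",
   "neoadjuvant therapy", "adjuvant therapy", "adjuvant chemotherapy",
   "palliative therapy", "palliative care",
   "sentinel lymph node", "sentinel node biopsy",
   "lymphovascular invasion",
   "lumpectomy", "mastectomy",
   "aromatase inhibitor",
   "estrogen receptor", "progesterone receptor",
   "triple-negative breast cancer", "triple negative breast cancer"]

-- the Python dict parameter as a PySem.Dict (insertion order, later duplicate keys overwrite)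
def pvDict (dictionary : List (String × String × String)) : PySem.Dict String (String × String) :=
  dictionary.foldl (fun d e => PySem.Dict.insert d e.1 e.2) PySem.Dict.empty

-- term.lower().split()[0]; the [0] of an empty split (Python IndexError) is excluded by Pre_
def pvShort (t : String) : String :=
  PySem.List.pyGetD (PySem.Str.split₀ (PySem.Str.lower t)) 0 ""

def find_relevant_definitions (note_text : String) (dictionary : List (String × String × String)) (max_terms : Int) : List (String × String) :=
  if dictionary = [] then []
  else
    let note_lower := PySem.Str.lower note_text
    let d := pvDict dictionary
    let matched := pvPriorityTerms.foldl (fun acc pt =>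
      if PySem.Str.isIn pt note_lower then
        match PySem.Dict.get? d pt with
        | some v => acc ++ [v]
        | none => acc
      else acc) []
    let sortedM := PySem.List.sorted matched (fun x => -(PySem.Str.len x.1))
    let ded := sortedM.foldl (fun (st : List (String × String) × PySem.Set String) td =>
      let short := pvShort td.1
      if PySem.Set.contains st.2 short then st
      else (st.1 ++ [td], PySem.Set.add st.2 short)) ([], PySem.Set.empty)
    PySem.List.slice ded.1 none (some max_terms)

-- ===== PORT B =====
def find_relevant_definitions_alt (note_text : String) (dictionary : List (String × String × String)) (max_terms : Int) : List (String × String) :=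
  let note_lower := PySem.Str.lower note_text
  let d := pvDict dictionary
  let best := pvPriorityTerms.foldl (fun (b : PySem.Dict String (String × String)) pt =>
    if PySem.Str.isIn pt note_lower then
      match PySem.Dict.get? d pt with
      | some td =>
        let first := pvShort td.1
        match PySem.Dict.get? b first with
        | none => PySem.Dict.insert b first td
        | some cur =>
          if PySem.Str.len cur.1 < PySem.Str.len td.1 then PySem.Dict.insert b first td else b
      | none => b
    else b) PySem.Dict.empty
  PySem.List.slice (PySem.List.sorted (PySem.Dict.values best) (fun td => -(PySem.Str.len td.1))) none (some max_terms)

-- ===== PRECONDITION & SPEC =====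
-- the dictionary entries A's scan matches in the note, in the curated list's written order
def pvMatched (note_text : String) (dictionary : List (String × String × String)) : List (String × String) :=
  pvPriorityTerms.filterMap (fun pt =>
    if PySem.Str.isIn pt (PySem.Str.lower note_text) then PySem.Dict.get? (pvDict dictionary) pt else none)

-- Pre_ excludes (a) inputs where two matched terms have equal length — there Python A's choice and
-- output order follow the accidental hash-iteration order of its set literal, so neither value is
-- specified — and (b) inputs where a matched term has an empty first word, on which A raises IndexError.
def Pre_find_relevant_definitions (note_text : String) (dictionary : List (String × String × String)) (max_terms : Int) : Prop :=
  (pvMatched note_text dictionary).Pairwise (fun a b => PySem.Str.len a.1 ≠ PySem.Str.len b.1) ∧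
  ∀ v ∈ pvMatched note_text dictionary, PySem.Str.split₀ (PySem.Str.lower v.1) ≠ []
instance (note_text : String) (dictionary : List (String × String × String)) (max_terms : Int) : Decidable (Pre_find_relevant_definitions note_text dictionary max_terms) := by unfold Pre_find_relevant_definitions; infer_instance

def pvWitness_find_relevant_definitions : String × (List (String × String × String)) × Int :=
  ("dcis and her2 noted", [("dcis", "DCIS", "ductal carcinoma in situ"), ("her2", "HER2 receptor", "growth-factor receptor")], 15)

def Spec_find_relevant_definitions (note_text : String) (dictionary : List (String × String × String)) (max_terms : Int) (out : List (String × String)) : Prop := out = find_relevant_definitions_alt note_text dictionary max_terms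
instance (note_text : String) (dictionary : List (String × String × String)) (max_terms : Int) (out : List (String × String)) : Decidable (Spec_find_relevant_definitions note_text dictionary max_terms out) := by unfold Spec_find_relevant_definitions; infer_instance

-- ===== CLAIM (what is proved, stated in full; the proofs are below) =====
def Claim_equal_find_relevant_definitions : Prop := ∀ (note_text : String) (dictionary : List (String × String × String)) (max_terms : Int), Dom_find_relevant_definitions note_text dictionary max_terms → Pre_find_relevant_definitions note_text dictionary max_terms → Spec_find_relevant_definitions note_text dictionary max_terms (find_relevant_definitions note_text dictionary max_terms)

-- ===== LEMMAS AND PROOFS =====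

-- keep-first-of-each-first-word (the effect of A's seen-set pass)
def pvDed : List (String × String) → List (String × String)
  | [] => []
  | e :: es => e :: pvDed (es.filter (fun f => !(pvShort f.1 == pvShort e.1)))
  termination_by l => l.length
  decreasing_by simpa using Nat.lt_succ_of_le (le_trans (List.length_filter_le _ _) (by simp))

theorem pvDed_cons (e : String × String) (es : List (String × String)) :
    pvDed (e :: es) = e :: pvDed (es.filter (fun f => !(pvShort f.1 == pvShort e.1))) := by
  rw [pvDed]

-- "e is a longest match for its first word" (winner test over a pool l)
def pvW (l : List (String × String)) (e : String × String) : Bool :=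
  ! l.any (fun f => (pvShort f.1 == pvShort e.1) && decide (PySem.Str.len e.1 < PySem.Str.len f.1))

-- B's per-key best-entry update, at a fixed key k
def pvUpd (k : String) (o : Option (String × String)) (e : String × String) : Option (String × String) :=
  if pvShort e.1 == k then
    match o with
    | none => some e
    | some c => if PySem.Str.len c.1 < PySem.Str.len e.1 then some e else some c
  else o

-- B's fold step over the best-dict
def pvStep (b : PySem.Dict String (String × String)) (td : String × String) : PySem.Dict String (String × String) :=
  match PySem.Dict.get? b (pvShort td.1) with
  | none => PySem.Dict.insert b (pvShort td.1) td
  | some cur => if PySem.Str.len cur.1 < PySem.Str.len td.1 then PySem.Dict.insert b (pvShort td.1) td else b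

theorem pv_matched_eq (l : List String) (c : String → Bool) (g : String → Option (String × String)) (acc : List (String × String)) :
    l.foldl (fun acc pt => if c pt then (match g pt with | some v => acc ++ [v] | none => acc) else acc) acc
      = acc ++ l.filterMap (fun pt => if c pt then g pt else none) := by
  induction l generalizing acc with
  | nil => simp
  | cons pt l ih =>
    by_cases hc : c pt = true
    · cases hg : g pt <;> simp [hc, hg, ih]
    · simp only [Bool.not_eq_true] at hc
      simp [hc, ih]

theorem pv_fold_skip (l : List String) (note_lower : String) (d : PySem.Dict String (String × String)) (init : PySem.Dict String (String × String)) :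
    l.foldl (fun (b : PySem.Dict String (String × String)) pt =>
      if PySem.Str.isIn pt note_lower then
        match PySem.Dict.get? d pt with
        | some td =>
          let first := pvShort td.1
          match PySem.Dict.get? b first with
          | none => PySem.Dict.insert b first td
          | some cur =>
            if PySem.Str.len cur.1 < PySem.Str.len td.1 then PySem.Dict.insert b first td else b
        | none => b
      else b) init
      = (l.filterMap (fun pt => if PySem.Str.isIn pt note_lower then PySem.Dict.get? d pt else none)).foldl pvStep init := by
  induction l generalizing init with
  | nil => simp
  | cons pt l ih =>
    by_cases hc : PySem.Str.isIn pt note_lower = true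
    · cases hg : PySem.Dict.get? d pt with
      | none =>
        simp only [List.foldl_cons, List.filterMap_cons, hc, hg, reduceIte]
        exact ih init
      | some td =>
        simp only [List.foldl_cons, List.filterMap_cons, hc, hg, reduceIte]
        rw [ih]
        congr 1
    · simp only [Bool.not_eq_true] at hc
      simp only [List.foldl_cons, List.filterMap_cons, hc, Bool.false_eq_true, reduceIte]
      exact ih init

theorem pv_get?_step (b : PySem.Dict String (String × String)) (e : String × String) (k : String) :
    PySem.Dict.get? (pvStep b e) k = pvUpd k (PySem.Dict.get? b k) e := by
  have hks : ∀ (hk : ¬ pvShort e.1 = k), k ≠ pvShort e.1 := fun hk h => hk h.symm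
  unfold pvStep pvUpd
  by_cases hk : pvShort e.1 = k
  · subst hk
    rw [if_pos (beq_self_eq_true _)]
    cases hb : PySem.Dict.get? b (pvShort e.1) with
    | none => exact PySem.Dict.get?_insert_self _ _ _
    | some c =>
      show PySem.Dict.get? (if PySem.Str.len c.1 < PySem.Str.len e.1 then PySem.Dict.insert b (pvShort e.1) e else b) _ = (if PySem.Str.len c.1 < PySem.Str.len e.1 then some e else some c)
      by_cases hl : PySem.Str.len c.1 < PySem.Str.len e.1
      · rw [if_pos hl, if_pos hl]
        exact PySem.Dict.get?_insert_self _ _ _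
      · rw [if_neg hl, if_neg hl]
        exact hb
  · rw [if_neg (by simp [hk])]
    cases hb : PySem.Dict.get? b (pvShort e.1) with
    | none => rw [PySem.Dict.get?_insert, if_neg (hks hk)]
    | some c =>
      show PySem.Dict.get? (if PySem.Str.len c.1 < PySem.Str.len e.1 then PySem.Dict.insert b (pvShort e.1) e else b) k = PySem.Dict.get? b k
      by_cases hl : PySem.Str.len c.1 < PySem.Str.len e.1
      · rw [if_pos hl, PySem.Dict.get?_insert, if_neg (hks hk)]
      · rw [if_neg hl]
theorem pv_get?_fold (r : List (String × String)) (b : PySem.Dict String (String × String)) (k : String) :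
    PySem.Dict.get? (r.foldl pvStep b) k = r.foldl (pvUpd k) (PySem.Dict.get? b k) := by
  induction r generalizing b with
  | nil => rfl
  | cons e r ih => rw [List.foldl_cons, List.foldl_cons, ih, pv_get?_step]

theorem pv_upd_some {k : String} {o : Option (String × String)} {e v : String × String}
    (h : pvUpd k o e = some v) : o = some v ∨ (v = e ∧ pvShort e.1 = k) := by
  unfold pvUpd at h
  by_cases hk : (pvShort e.1 == k) = true
  · rw [if_pos hk] at h
    cases o with
    | none => exact Or.inr ⟨(Option.some_inj.mp h).symm, eq_of_beq hk⟩
    | some c =>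
      by_cases hl : PySem.Str.len c.1 < PySem.Str.len e.1
      · rw [show (match some c with
            | none => some e
            | some c => if PySem.Str.len c.1 < PySem.Str.len e.1 then some e else some c) =
            (if PySem.Str.len c.1 < PySem.Str.len e.1 then some e else some c) from rfl,
          if_pos hl] at h
        exact Or.inr ⟨(Option.some_inj.mp h).symm, eq_of_beq hk⟩
      · rw [show (match some c with
            | none => some e
            | some c => if PySem.Str.len c.1 < PySem.Str.len e.1 then some e else some c) =
            (if PySem.Str.len c.1 < PySem.Str.len e.1 then some e else some c) from rfl,
          if_neg hl] at h
        exact Or.inl h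
  · rw [if_neg hk] at h
    exact Or.inl h
theorem pv_upd_of_some {k : String} {o : Option (String × String)} {e : String × String} {w : String × String}
    (ho : o = some w) : ∃ v, pvUpd k o e = some v ∧ PySem.Str.len w.1 ≤ PySem.Str.len v.1 := by
  subst ho
  unfold pvUpd
  by_cases hk : (pvShort e.1 == k) = true
  · rw [if_pos hk]
    by_cases hl : PySem.Str.len w.1 < PySem.Str.len e.1
    · refine ⟨e, ?_, le_of_lt hl⟩
      rw [show (match some w with
          | none => some e
          | some c => if PySem.Str.len c.1 < PySem.Str.len e.1 then some e else some c) =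
          (if PySem.Str.len w.1 < PySem.Str.len e.1 then some e else some w) from rfl, if_pos hl]
    · refine ⟨w, ?_, le_refl _⟩
      rw [show (match some w with
          | none => some e
          | some c => if PySem.Str.len c.1 < PySem.Str.len e.1 then some e else some c) =
          (if PySem.Str.len w.1 < PySem.Str.len e.1 then some e else some w) from rfl, if_neg hl]
  · rw [if_neg hk]
    exact ⟨w, rfl, le_refl _⟩
theorem pv_upd_key {k : String} {o : Option (String × String)} {e : String × String}
    (hk : pvShort e.1 = k) : ∃ v, pvUpd k o e = some v ∧ PySem.Str.len e.1 ≤ PySem.Str.len v.1 := by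
  unfold pvUpd
  have hbeq : (pvShort e.1 == k) = true := beq_iff_eq.mpr hk
  rw [if_pos hbeq]
  cases o with
  | none => exact ⟨e, rfl, le_refl _⟩
  | some c =>
    rw [show (match some c with
        | none => some e
        | some c => if PySem.Str.len c.1 < PySem.Str.len e.1 then some e else some c) =
        (if PySem.Str.len c.1 < PySem.Str.len e.1 then some e else some c) from rfl]
    by_cases hl : PySem.Str.len c.1 < PySem.Str.len e.1
    · rw [if_pos hl]
      exact ⟨e, rfl, le_refl _⟩
    · rw [if_neg hl]
      exact ⟨c, rfl, le_of_not_gt hl⟩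
theorem pv_fold_upd_mono (k : String) (r : List (String × String)) :
    ∀ (w v : String × String), r.foldl (pvUpd k) (some w) = some v → PySem.Str.len w.1 ≤ PySem.Str.len v.1 := by
  induction r with
  | nil => intro w v h; simp at h; simp [h]
  | cons e r ih =>
    intro w v h
    rw [List.foldl_cons] at h
    obtain ⟨w', hw', hle⟩ := pv_upd_of_some (e := e) (k := k) (o := some w) rfl
    rw [hw'] at h
    exact le_trans hle (ih w' v h)

theorem pv_fold_upd_mem (k : String) (r : List (String × String)) :
    ∀ (o : Option (String × String)) (v : String × String), r.foldl (pvUpd k) o = some v →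
      o = some v ∨ (v ∈ r ∧ pvShort v.1 = k) := by
  induction r with
  | nil => intro o v h; simp at h; simp [h]
  | cons e r ih =>
    intro o v h
    rw [List.foldl_cons] at h
    rcases ih _ v h with h' | ⟨hm, hk⟩
    · rcases pv_upd_some h' with h'' | ⟨rfl, hk⟩
      · exact Or.inl h''
      · exact Or.inr ⟨List.mem_cons_self, hk⟩
    · exact Or.inr ⟨List.mem_cons_of_mem _ hm, hk⟩

theorem pv_fold_upd_max (k : String) (r : List (String × String)) :
    ∀ (o : Option (String × String)) (v : String × String), r.foldl (pvUpd k) o = some v →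
      ∀ f ∈ r, pvShort f.1 = k → PySem.Str.len f.1 ≤ PySem.Str.len v.1 := by
  induction r with
  | nil => intro o v h f hf; simp at hf
  | cons e r ih =>
    intro o v h f hf hk
    rw [List.foldl_cons] at h
    rcases List.mem_cons.mp hf with rfl | hf
    · obtain ⟨w, hw, hle⟩ := pv_upd_key (o := o) hk
      rw [hw] at h
      exact le_trans hle (pv_fold_upd_mono k r w v h)
    · exact ih _ v h f hf hk

theorem pv_fold_upd_isSome (k : String) (r : List (String × String)) :
    ∀ (o : Option (String × String)) (f : String × String), f ∈ r → pvShort f.1 = k →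
      (r.foldl (pvUpd k) o).isSome := by
  have hsome : ∀ (r : List (String × String)) (w : String × String),
      ∃ v, r.foldl (pvUpd k) (some w) = some v := by
    intro r
    induction r with
    | nil => exact fun w => ⟨w, rfl⟩
    | cons g r ihg =>
      intro w
      rw [List.foldl_cons]
      obtain ⟨w', hw', _⟩ := pv_upd_of_some (e := g) (k := k) (o := some w) rfl
      rw [hw']
      exact ihg w'
  induction r with
  | nil => intro o f hf; simp at hf
  | cons e r ih =>
    intro o f hf hk
    rw [List.foldl_cons]
    rcases List.mem_cons.mp hf with rfl | hf
    · obtain ⟨w, hw, _⟩ := pv_upd_key (o := o) hk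
      rw [hw]
      obtain ⟨v, hv⟩ := hsome r w
      simp [hv]
    · exact ih _ f hf hk

theorem pv_keys_nodup_fold (r : List (String × String)) (b : PySem.Dict String (String × String))
    (h : (PySem.Dict.keys b).Nodup) : (PySem.Dict.keys (r.foldl pvStep b)).Nodup := by
  induction r generalizing b with
  | nil => exact h
  | cons e r ih =>
    rw [List.foldl_cons]
    apply ih
    unfold pvStep
    cases hb : PySem.Dict.get? b (pvShort e.1) with
    | none => exact PySem.Dict.nodup_keys_insert _ _ _ h
    | some c =>
      rw [show (match some c with
          | none => PySem.Dict.insert b (pvShort e.1) e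
          | some cur => if PySem.Str.len cur.1 < PySem.Str.len e.1 then PySem.Dict.insert b (pvShort e.1) e else b) =
          (if PySem.Str.len c.1 < PySem.Str.len e.1 then PySem.Dict.insert b (pvShort e.1) e else b) from rfl]
      by_cases hl : PySem.Str.len c.1 < PySem.Str.len e.1
      · rw [if_pos hl]; exact PySem.Dict.nodup_keys_insert _ _ _ h
      · rw [if_neg hl]; exact h
theorem pv_contains_add (se : PySem.Set String) (x y : String) :
    PySem.Set.contains (PySem.Set.add se x) y = (PySem.Set.contains se y || (y == x)) := by
  by_cases hxy : y = x
  · subst hxy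
    by_cases h : PySem.Set.contains se y = true <;>
      simp_all [PySem.Set.add, PySem.Set.contains]
  · have h1 : (y == x) = false := by simp [hxy]
    by_cases h : PySem.Set.contains se x = true <;>
      simp_all [PySem.Set.add, PySem.Set.contains]

theorem pv_ded_fold (r : List (String × String)) (seen : PySem.Set String) (out : List (String × String)) :
    (r.foldl (fun (st : List (String × String) × PySem.Set String) td =>
        if PySem.Set.contains st.2 (pvShort td.1) then st
        else (st.1 ++ [td], PySem.Set.add st.2 (pvShort td.1))) (out, seen)).1
      = out ++ pvDed (r.filter (fun e => !PySem.Set.contains seen (pvShort e.1))) := by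
  induction r generalizing seen out with
  | nil => simp [pvDed]
  | cons e r ih =>
    simp only [List.foldl_cons, List.filter_cons]
    cases hc : PySem.Set.contains seen (pvShort e.1) with
    | true =>
      simp only [Bool.not_true, reduceIte]
      exact ih seen out
    | false =>
      rw [if_neg Bool.false_ne_true]
      simp only [Bool.not_false, reduceIte]
      rw [ih (PySem.Set.add seen (pvShort e.1)) (out ++ [e]), pvDed_cons, List.filter_filter,
        List.append_assoc, List.singleton_append]
      have hfe : r.filter (fun f => !PySem.Set.contains (PySem.Set.add seen (pvShort e.1)) (pvShort f.1))
          = r.filter (fun f => (!(pvShort f.1 == pvShort e.1)) && !PySem.Set.contains seen (pvShort f.1)) := by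
        apply List.filter_congr
        intro f _
        rw [pv_contains_add]
        cases h1 : PySem.Set.contains seen (pvShort f.1) <;>
          cases h2 : pvShort f.1 == pvShort e.1 <;> rfl
      rw [hfe]

theorem pv_W_perm {l l' : List (String × String)} (h : l.Perm l') (e : String × String) :
    pvW l e = pvW l' e := by
  simp only [pvW, h.any_eq]

theorem pv_W_iff {l : List (String × String)} {e : String × String} :
    pvW l e = true ↔ ∀ f ∈ l, pvShort f.1 = pvShort e.1 → PySem.Str.len f.1 ≤ PySem.Str.len e.1 := by
  simp only [pvW, Bool.not_eq_true', List.any_eq_false]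
  constructor
  · intro h f hf hk
    have h' := h f hf
    simp only [hk, beq_self_eq_true, Bool.true_and] at h'
    have hnl : ¬ PySem.Str.len e.1 < PySem.Str.len f.1 := by
      intro hlt
      exact h' (decide_eq_true hlt)
    exact not_lt.mp hnl
  · intro h f hf
    by_cases hk : pvShort f.1 = pvShort e.1
    · simp only [hk, beq_self_eq_true, Bool.true_and]
      simpa using not_lt.mpr (h f hf hk)
    · simp [hk]

set_option maxHeartbeats 1600000 in
theorem pv_ded_filter_aux (n : Nat) : ∀ (l : List (String × String)), l.length ≤ n →
    l.Pairwise (fun a b => PySem.Str.len b.1 < PySem.Str.len a.1) → pvDed l = l.filter (pvW l) := by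
  induction n with
  | zero =>
    intro l hl _
    rw [List.length_eq_zero_iff.mp (Nat.le_zero.mp hl)]
    simp [pvDed]
  | succ n ihn =>
    intro l hl h
    cases l with
    | nil => simp [pvDed]
    | cons e es =>
      rw [List.pairwise_cons] at h
      rw [pvDed_cons]
      have hWe : pvW (e :: es) e = true := by
        rw [pv_W_iff]
        intro f hf hk
        rcases List.mem_cons.mp hf with rfl | hf
        · exact le_refl _
        · exact le_of_lt (h.1 f hf)
      have hlen : (es.filter (fun f => !(pvShort f.1 == pvShort e.1))).length ≤ n := by
        have := List.length_filter_le (fun f => !(pvShort f.1 == pvShort e.1)) es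
        simp only [List.length_cons, Nat.succ_le_succ_iff] at hl
        omega
      have hpair : (es.filter (fun f => !(pvShort f.1 == pvShort e.1))).Pairwise
          (fun a b => PySem.Str.len b.1 < PySem.Str.len a.1) := h.2.filter _
      rw [ihn _ hlen hpair, List.filter_cons, hWe, if_pos rfl]
      refine congrArg (List.cons e) ?_
      rw [List.filter_filter]
      apply List.filter_congr
      intro f hf
      cases hs : pvShort f.1 == pvShort e.1 with
      | true =>
        have hkey : pvShort e.1 = pvShort f.1 := (eq_of_beq hs).symm
        have hWf : pvW (e :: es) f = false := by
          rw [Bool.eq_false_iff]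
          intro hw
          exact absurd (pv_W_iff.mp hw e List.mem_cons_self hkey) (not_le.mpr (h.1 f hf))
        simp only [Bool.not_true, Bool.and_false]
        exact hWf.symm
      | false =>
        have hsymm : (pvShort e.1 == pvShort f.1) = false := by
          rw [beq_eq_false_iff_ne]
          exact fun hh => (beq_eq_false_iff_ne.mp hs) hh.symm
        simp only [Bool.and_true, Bool.not_false]
        simp only [pvW, List.any_cons, List.any_filter, hsymm, Bool.false_and, Bool.false_or]
        refine congrArg (fun b => !b) ?_
        refine List.any_congr rfl ?_
        intro g
        cases hgf : pvShort g.1 == pvShort f.1 with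
        | false => simp
        | true =>
          have hge : (pvShort g.1 == pvShort e.1) = false := by
            rw [beq_eq_false_iff_ne, eq_of_beq hgf]
            exact beq_eq_false_iff_ne.mp hs
          simp [hge]

set_option maxHeartbeats 1600000 in
theorem pv_core (ms : List (String × String))
    (hdist : ms.Pairwise (fun a b => PySem.Str.len a.1 ≠ PySem.Str.len b.1)) :
    ((PySem.List.sorted ms (fun x => -(PySem.Str.len x.1))).foldl
        (fun (st : List (String × String) × PySem.Set String) td =>
          if PySem.Set.contains st.2 (pvShort td.1) then st
          else (st.1 ++ [td], PySem.Set.add st.2 (pvShort td.1))) ([], PySem.Set.empty)).1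
      = PySem.List.sorted (PySem.Dict.values (ms.foldl pvStep PySem.Dict.empty))
          (fun td => -(PySem.Str.len td.1)) := by
  have hperm := PySem.List.sorted_perm ms (fun x => -(PySem.Str.len x.1)) false
  have hLle := PySem.List.sorted_pairwise ms (fun x => -(PySem.Str.len x.1))
  have hne : (PySem.List.sorted ms (fun x => -(PySem.Str.len x.1))).Pairwise
      (fun a b => PySem.Str.len a.1 ≠ PySem.Str.len b.1) :=
    (List.Perm.pairwise_iff (fun h hh => h hh.symm) hperm).mpr hdist
  have h2 : (PySem.List.sorted ms (fun x => -(PySem.Str.len x.1))).Pairwise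
      (fun a b => PySem.Str.len b.1 < PySem.Str.len a.1) :=
    (hLle.and hne).imp (fun h => by omega)
  rw [pv_ded_fold, List.nil_append]
  have hfilt : (PySem.List.sorted ms (fun x => -(PySem.Str.len x.1))).filter
      (fun e => !PySem.Set.contains PySem.Set.empty (pvShort e.1))
      = PySem.List.sorted ms (fun x => -(PySem.Str.len x.1)) := by
    simp [PySem.Set.contains, PySem.Set.empty]
  rw [hfilt, pv_ded_filter_aux (PySem.List.sorted ms (fun x => -(PySem.Str.len x.1))).length _
    (le_refl _) h2]
  have hWcong : (PySem.List.sorted ms (fun x => -(PySem.Str.len x.1))).filter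
      (pvW (PySem.List.sorted ms (fun x => -(PySem.Str.len x.1))))
      = (PySem.List.sorted ms (fun x => -(PySem.Str.len x.1))).filter (pvW ms) :=
    List.filter_congr (fun e _ => pv_W_perm hperm e)
  rw [hWcong]
  -- characterise B's best-dict
  have hget : ∀ k, PySem.Dict.get? (ms.foldl pvStep PySem.Dict.empty) k = ms.foldl (pvUpd k) none := by
    intro k
    rw [pv_get?_fold, PySem.Dict.get?_empty]
  have hmax : ∀ k v, PySem.Dict.get? (ms.foldl pvStep PySem.Dict.empty) k = some v →
      v ∈ ms ∧ pvShort v.1 = k ∧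
        ∀ f ∈ ms, pvShort f.1 = k → PySem.Str.len f.1 ≤ PySem.Str.len v.1 := by
    intro k v hv
    rw [hget] at hv
    rcases pv_fold_upd_mem k ms none v hv with h' | ⟨hm, hk⟩
    · cases h'
    · exact ⟨hm, hk, pv_fold_upd_max k ms none v hv⟩
  have hmapnodup : (ms.map (fun e => PySem.Str.len e.1)).Nodup :=
    List.Pairwise.map _ (fun a b h => h) hdist
  have hinj := List.inj_on_of_nodup_map hmapnodup
  have hwin : ∀ v ∈ ms, pvW ms v = true →
      PySem.Dict.get? (ms.foldl pvStep PySem.Dict.empty) (pvShort v.1) = some v := by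
    intro v hv hw
    have hsome : (ms.foldl (pvUpd (pvShort v.1)) none).isSome :=
      pv_fold_upd_isSome _ ms none v hv rfl
    rw [hget]
    obtain ⟨w, hw'⟩ := Option.isSome_iff_exists.mp hsome
    rw [hw']
    have h6 := hmax (pvShort v.1) w (by rw [hget]; exact hw')
    have hle1 : PySem.Str.len w.1 ≤ PySem.Str.len v.1 := pv_W_iff.mp hw w h6.1 h6.2.1
    have hle2 : PySem.Str.len v.1 ≤ PySem.Str.len w.1 := h6.2.2 v hv rfl
    rw [hinj h6.1 hv (le_antisymm hle1 hle2)]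
  have hnodk : (PySem.Dict.keys (ms.foldl pvStep PySem.Dict.empty)).Nodup :=
    pv_keys_nodup_fold ms PySem.Dict.empty (by simp [PySem.Dict.empty, PySem.Dict.keys])
  have hmemval : ∀ v, v ∈ PySem.Dict.values (ms.foldl pvStep PySem.Dict.empty)
      ↔ v ∈ ms.filter (pvW ms) := by
    intro v
    rw [List.mem_filter]
    constructor
    · intro hvv
      simp only [PySem.Dict.values] at hvv
      obtain ⟨⟨pk, pv⟩, hp, hpv⟩ := List.mem_map.mp hvv
      have hg : PySem.Dict.get? (ms.foldl pvStep PySem.Dict.empty) pk = some pv :=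
        PySem.Dict.get?_of_mem_items _ hp hnodk
      have h6 := hmax pk pv hg
      subst hpv
      refine ⟨h6.1, ?_⟩
      rw [pv_W_iff]
      intro f hf hk
      exact h6.2.2 f hf (by rw [hk, h6.2.1])
    · intro hv
      have hg := hwin v hv.1 hv.2
      have hitems := PySem.Dict.mem_items_of_get?_eq_some _ hg
      simp only [PySem.Dict.values]
      exact List.mem_map.mpr ⟨(pvShort v.1, v), hitems, rfl⟩
  have hnodupvals : (PySem.Dict.values (ms.foldl pvStep PySem.Dict.empty)).Nodup := by
    rw [PySem.Dict.values_eq_map_keys _ hnodk ("", "")]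
    refine List.Nodup.map_on ?_ hnodk
    intro k1 h1 k2 h2 heq
    simp only [PySem.Dict.keys] at h1 h2
    obtain ⟨⟨q1, v1⟩, hq1, hk1⟩ := List.mem_map.mp h1
    obtain ⟨⟨q2, v2⟩, hq2, hk2⟩ := List.mem_map.mp h2
    subst hk1
    subst hk2
    have hv1 := PySem.Dict.get?_of_mem_items _ hq1 hnodk
    have hv2 := PySem.Dict.get?_of_mem_items _ hq2 hnodk
    rw [PySem.Dict.getD_of_get?_eq_some _ _ hv1, PySem.Dict.getD_of_get?_eq_some _ _ hv2] at heq
    subst heq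
    rw [← (hmax q1 v1 hv1).2.1, ← (hmax q2 v1 hv2).2.1]
  have hnodupwin : (ms.filter (pvW ms)).Nodup :=
    List.Nodup.filter _ (hdist.imp (fun h he => h (by rw [he])))
  have hpermvals : (PySem.Dict.values (ms.foldl pvStep PySem.Dict.empty)).Perm
      (ms.filter (pvW ms)) :=
    (List.perm_ext_iff_of_nodup hnodupvals hnodupwin).mpr hmemval
  have hpair2 : ((PySem.List.sorted ms (fun x => -(PySem.Str.len x.1))).filter (pvW ms)).Pairwise
      (fun a b => -(PySem.Str.len a.1) < -(PySem.Str.len b.1)) :=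
    (h2.filter _).imp (fun h => by omega)
  have hperm2 : ((PySem.List.sorted ms (fun x => -(PySem.Str.len x.1))).filter (pvW ms)).Perm
      (PySem.Dict.values (ms.foldl pvStep PySem.Dict.empty)) :=
    (hperm.filter _).trans hpermvals.symm
  exact (PySem.List.sorted_eq_of_perm_of_pairwise_lt _ _ _ hperm2 hpair2).symm

-- ===== VERDICT (by name: the statement is the Claim_ definition above) =====
theorem find_relevant_definitions_spec : Claim_equal_find_relevant_definitions := by
  intro note_text dictionary max_terms _ hPre
  unfold Spec_find_relevant_definitions find_relevant_definitions find_relevant_definitions_alt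
  by_cases hd : dictionary = []
  · subst hd
    rw [if_pos rfl]
    dsimp only
    rw [pv_fold_skip]
    have hms : pvPriorityTerms.filterMap (fun pt =>
        if PySem.Str.isIn pt (PySem.Str.lower note_text) then PySem.Dict.get? (pvDict []) pt else none)
        = [] := by
      simp [pvDict, PySem.Dict.get?_empty]
    rw [hms]
    simp [PySem.List.slice, PySem.Dict.values, PySem.Dict.empty, PySem.List.sorted]
  · rw [if_neg hd]
    dsimp only
    rw [pv_matched_eq, List.nil_append, pv_fold_skip]
    exact congrArg (fun l => PySem.List.slice l none (some max_terms)) (pv_core _ hPre.1)
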